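-- pv_equiv track=rewrite | github.com/jianghao-jianghao-jianghao/GovAI | backend/app/api/documents.py | _split_paragraphs_into_chunks
-- ===== SOURCE A (Python) =====
-- _INCREMENTAL_MAX_PARAS_PER_CHUNK = 40   # 每块最多段落数
--
-- _INCREMENTAL_MAX_CHARS_PER_CHUNK = 4500  # 每块最多字符数
--
-- def _split_paragraphs_into_chunks(
--     paragraphs: list[dict],
--     max_chars: int = _INCREMENTAL_MAX_CHARS_PER_CHUNK,
--     max_paras: int = _INCREMENTAL_MAX_PARAS_PER_CHUNK,
-- ) -> list[tuple[int, list[dict]]]: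
--     """
--     将段落列表分割为多个块，返回 [(start_global_index, chunk_paragraphs), ...]。
--     每块不超过 max_chars 字符或 max_paras 段落。
--     """
--     if not paragraphs:
--         return []
--
--     chunks: list[tuple[int, list[dict]]] = []
--     current_chunk: list[dict] = []
--     current_chars = 0
--     chunk_start = 0
--
--     for i, para in enumerate(paragraphs):
--         para_chars = len(para.get("text", "")) + 80  # 属性开销
--
--         if current_chunk and (current_chars + para_chars > max_chars or len(current_chunk) >= max_paras):
--             chunks.append((chunk_start, current_chunk))
--             current_chunk = []
--             current_chars = 0
--             chunk_start = i
--
--         current_chunk.append(para)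
--         current_chars += para_chars
--
--     if current_chunk:
--         chunks.append((chunk_start, current_chunk))
--
--     return chunks
-- ===== SOURCE B (Python) =====
-- _INCREMENTAL_MAX_PARAS_PER_CHUNK = 40
-- _INCREMENTAL_MAX_CHARS_PER_CHUNK = 4500
--
-- def _split_paragraphs_into_chunks(
--     paragraphs,
--     max_chars=_INCREMENTAL_MAX_CHARS_PER_CHUNK,
--     max_paras=_INCREMENTAL_MAX_PARAS_PER_CHUNK,
-- ):
--     chunks = []
--     n = len(paragraphs)
--     start = 0
--     while start < n:
--         total = len(paragraphs[start].get("text", "")) + 80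
--         i = start + 1
--         while i < n and (i - start) < max_paras:
--             cost = len(paragraphs[i].get("text", "")) + 80
--             if total + cost > max_chars:
--                 break
--             total += cost
--             i += 1
--         chunks.append((start, paragraphs[start:i]))
--         start = i
--     return chunks
-- ===== Notes on version B (the rewrite author's own statement) =====
-- stated objective: alternative
-- what changed: Replaced A's single pass with one flat accumulator state (current chunk, char count, pending start, trailing flush) by a two-level decomposition: an outer loop over chunk start indices and an inner loop that grows each chunk until the strict '>' budget or the paragraph cap stops it, emitting (start, paragraphs[start:i]) directly with no flush step.
import Mathlib
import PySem

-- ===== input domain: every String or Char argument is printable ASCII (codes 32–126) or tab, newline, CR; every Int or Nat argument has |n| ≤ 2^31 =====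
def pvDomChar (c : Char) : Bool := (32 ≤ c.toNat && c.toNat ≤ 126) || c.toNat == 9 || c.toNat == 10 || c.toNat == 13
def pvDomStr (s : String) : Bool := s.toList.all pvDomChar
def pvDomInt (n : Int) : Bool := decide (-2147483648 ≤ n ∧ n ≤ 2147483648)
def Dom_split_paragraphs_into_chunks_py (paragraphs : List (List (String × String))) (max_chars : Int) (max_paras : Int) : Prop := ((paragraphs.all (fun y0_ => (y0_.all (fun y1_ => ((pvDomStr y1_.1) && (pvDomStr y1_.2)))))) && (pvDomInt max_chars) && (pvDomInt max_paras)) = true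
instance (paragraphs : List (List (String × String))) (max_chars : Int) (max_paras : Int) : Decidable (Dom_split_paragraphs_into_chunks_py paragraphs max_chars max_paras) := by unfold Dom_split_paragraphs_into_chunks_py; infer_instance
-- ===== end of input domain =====

-- B re-decomposes A's single accumulator loop as an outer loop over chunk start
-- indices with an inner loop growing each chunk; same return value (objective: alternative).

-- len(para.get("text", "")) + 80  (shared cost formula, used verbatim by both Pythons)
def pvParaCost (para : List (String × String)) : Int :=
  PySem.Str.len (PySem.Dict.getD ⟨para⟩ "text" "") + 80

-- ===== PORT A =====
-- the for-loop of A: state (chunks, current_chunk, current_chars, chunk_start), index i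
def pvALoop (mc mp : Int) :
    List (List (String × String)) → Int →
    List (Int × List (List (String × String))) → List (List (String × String)) → Int → Int →
    List (Int × List (List (String × String))) × List (List (String × String)) × Int
  | [], _, chunks, cur, _, start => (chunks, cur, start)
  | p :: rest, i, chunks, cur, chars, start =>
    let pc := pvParaCost p
    if cur ≠ [] ∧ (chars + pc > mc ∨ (cur.length : Int) ≥ mp) then
      pvALoop mc mp rest (i + 1) (chunks ++ [(start, cur)]) ([] ++ [p]) (0 + pc) i
    else
      pvALoop mc mp rest (i + 1) chunks (cur ++ [p]) (chars + pc) start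

def split_paragraphs_into_chunks_py (paragraphs : List (List (String × String))) (max_chars : Int) (max_paras : Int) : List (Int × (List (List (String × String)))) :=
  if paragraphs = [] then []
  else
    let st := pvALoop max_chars max_paras paragraphs 0 [] [] 0 0
    if st.2.1 ≠ [] then st.1 ++ [(st.2.2, st.2.1)] else st.1

-- ===== PORT B =====
-- inner while loop of B: grows the current chunk from rest; cnt = i - start, total = running cost
def pvBGrow (mc mp : Int) :
    List (List (String × String)) → Int → Int →
    List (List (String × String)) × List (List (String × String))
  | [], _, _ => ([], [])
  | p :: rest, cnt, total =>
    if cnt < mp ∧ ¬ (total + pvParaCost p > mc) then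
      let g := pvBGrow mc mp rest (cnt + 1) (total + pvParaCost p)
      (p :: g.1, g.2)
    else ([], p :: rest)

theorem pvBGrow_snd_len (mc mp : Int) (xs : List (List (String × String))) (cnt total : Int) :
    (pvBGrow mc mp xs cnt total).2.length ≤ xs.length := by
  induction xs generalizing cnt total with
  | nil => simp [pvBGrow]
  | cons p rest ih =>
    simp only [pvBGrow]
    split
    · exact le_trans (ih _ _) (Nat.le_succ _)
    · simp

-- outer while loop of B: one chunk per iteration, start advances past it
def pvBOuter (mc mp : Int) :
    List (List (String × String)) → Int → List (Int × List (List (String × String)))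
  | [], _ => []
  | p :: rest, start =>
    let g := pvBGrow mc mp rest 1 (pvParaCost p)
    (start, p :: g.1) :: pvBOuter mc mp g.2 (start + 1 + g.1.length)
termination_by xs _ => xs.length
decreasing_by
  exact Nat.lt_succ_of_le (pvBGrow_snd_len mc mp rest 1 (pvParaCost p))

def split_paragraphs_into_chunks_py_alt (paragraphs : List (List (String × String))) (max_chars : Int) (max_paras : Int) : List (Int × (List (List (String × String)))) :=
  pvBOuter max_chars max_paras paragraphs 0

-- ===== PRECONDITION & SPEC =====
def Spec_split_paragraphs_into_chunks_py (paragraphs : List (List (String × String))) (max_chars : Int) (max_paras : Int) (out : List (Int × (List (List (String × String))))) : Prop := out = split_paragraphs_into_chunks_py_alt paragraphs max_chars max_paras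
instance (paragraphs : List (List (String × String))) (max_chars : Int) (max_paras : Int) (out : List (Int × (List (List (String × String))))) : Decidable (Spec_split_paragraphs_into_chunks_py paragraphs max_chars max_paras out) := by unfold Spec_split_paragraphs_into_chunks_py; infer_instance

-- ===== CLAIM (what is proved, stated in full; the proofs are below) =====
def Claim_equal_split_paragraphs_into_chunks_py : Prop := ∀ (paragraphs : List (List (String × String))) (max_chars : Int) (max_paras : Int), Dom_split_paragraphs_into_chunks_py paragraphs max_chars max_paras → Spec_split_paragraphs_into_chunks_py paragraphs max_chars max_paras (split_paragraphs_into_chunks_py paragraphs max_chars max_paras)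

-- ===== LEMMAS AND PROOFS =====

-- A's trailing flush, as a function of the loop's final state
def pvAFinish (st : List (Int × List (List (String × String))) × List (List (String × String)) × Int) :
    List (Int × List (List (String × String))) :=
  if st.2.1 ≠ [] then st.1 ++ [(st.2.2, st.2.1)] else st.1

-- main invariant: from a nonempty current chunk, A's loop + flush produces
-- exactly the chunk B's grow completes, followed by B's outer loop on the remainder
theorem pvLoop_eq (mc mp : Int) (rest : List (List (String × String)))
    (i : Int) (chunks : List (Int × List (List (String × String))))
    (cur : List (List (String × String))) (chars start : Int) (hcur : cur ≠ []) :
    pvAFinish (pvALoop mc mp rest i chunks cur chars start) =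
      chunks ++ (start, cur ++ (pvBGrow mc mp rest (cur.length : Int) chars).1) ::
        pvBOuter mc mp (pvBGrow mc mp rest (cur.length : Int) chars).2
          (i + ((pvBGrow mc mp rest (cur.length : Int) chars).1.length : Int)) := by
  induction rest generalizing i chunks cur chars start with
  | nil => simp [pvALoop, pvBGrow, pvAFinish, pvBOuter, hcur]
  | cons p rest ih =>
    simp only [pvALoop, pvBGrow]
    by_cases h : (cur.length : Int) < mp ∧ ¬ (chars + pvParaCost p > mc)
    · -- B grows; A does not break
      rw [if_pos h, if_neg (by simp only [hcur, ne_eq, not_false_eq_true, true_and]; omega)]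
      rw [ih _ _ _ _ _ (by simp)]
      have hl : ((cur ++ [p]).length : Int) = (cur.length : Int) + 1 := by simp
      rw [hl]
      simp only [List.append_assoc, List.singleton_append, List.length_cons]
      refine congrArg (chunks ++ ·) (congrArg₂ (· :: ·) rfl ?_)
      refine congrArg _ ?_
      push_cast; ring
    · -- B stops; A flushes and starts a fresh chunk at i
      rw [if_neg h, if_pos (by simp only [hcur, ne_eq, not_false_eq_true, true_and]; omega)]
      rw [ih _ _ _ _ _ (by simp)]
      simp only [pvBOuter, List.append_assoc, List.singleton_append, List.nil_append,
        List.length_nil, List.length_cons]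
      refine congrArg (chunks ++ ·) ?_
      refine congrArg₂ (· :: ·) (by simp) ?_
      refine congrArg₂ (· :: ·) (by norm_num) ?_
      norm_num

theorem pv_top (mc mp : Int) (ps : List (List (String × String))) :
    split_paragraphs_into_chunks_py ps mc mp = split_paragraphs_into_chunks_py_alt ps mc mp := by
  cases ps with
  | nil => simp [split_paragraphs_into_chunks_py, split_paragraphs_into_chunks_py_alt, pvBOuter]
  | cons p rest =>
    show pvAFinish (pvALoop mc mp (p :: rest) 0 [] [] 0 0) = _
    simp only [pvALoop, ne_eq, not_true_eq_false, false_and, if_false, List.nil_append]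
    rw [pvLoop_eq mc mp rest (0 + 1) [] [p] (0 + pvParaCost p) 0 (by simp)]
    simp only [split_paragraphs_into_chunks_py_alt, pvBOuter, List.length_singleton,
      List.nil_append, List.singleton_append, Nat.cast_one, zero_add]


-- ===== VERDICT (by name: the statement is the Claim_ definition above) =====
theorem split_paragraphs_into_chunks_py_spec : Claim_equal_split_paragraphs_into_chunks_py := by
  intro ps mc mp _
  exact pv_top mc mp ps
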